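-- pv_equiv track=rewrite | github.com/DarkWinD1437/CriptografiaPython | cifra_por_sustitucion.py | backtrackSO
-- ===== SOURCE A (Python) =====
-- def backtrackSO(mensaje_cifrado, diccionario_inverso, path, start, mensaje_original):
--     if start == len(mensaje_cifrado):
--         posible_descifrado = ''.join(path)
--         return posible_descifrado if posible_descifrado == mensaje_original else None
--
--     homofono = mensaje_cifrado[start]
--     if homofono in diccionario_inverso:
--         for opcion in diccionario_inverso[homofono]:
--             path.append(opcion)
--             resultado = backtrackSO(mensaje_cifrado, diccionario_inverso, path, start + 1, mensaje_original)
--             if resultado: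
--                 return resultado
--             path.pop()
--     else:
--         path.append(homofono)  # Agregar el caracter original si no hay homófono
--         resultado = backtrackSO(mensaje_cifrado, diccionario_inverso, path, start + 1, mensaje_original)
--         if resultado:
--             return resultado
--         path.pop()
--     return None
-- ===== SOURCE B (Python) =====
-- def backtrackSO(mensaje_cifrado, diccionario_inverso, path, start, mensaje_original):
--     prefix = ''.join(path)
--     if not mensaje_original.startswith(prefix):
--         return None
--     seq = [mensaje_cifrado[i] for i in range(start, len(mensaje_cifrado))]
--
--     def solve(i, rest):
--         if i == len(seq):
--             return rest == ''
--         c = seq[i]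
--         if c in diccionario_inverso:
--             return any(rest.startswith(op) and solve(i + 1, rest[len(op):])
--                        for op in diccionario_inverso[c])
--         return rest.startswith(c) and solve(i + 1, rest[1:])
--
--     return mensaje_original if solve(0, mensaje_original[len(prefix):]) else None
-- ===== Notes on version B (the rewrite author's own statement) =====
-- stated objective: alternative
-- what changed: Replaces A's generate-then-compare backtracking (mutate a shared path, build every full candidate and compare the joined string with the target at the end) with a pruned prefix-matching decision procedure: each dictionary option is tried only where it matches the corresponding position of mensaje_original, and the target itself is returned on success.
-- intended difference: When mensaje_original is the empty string and start != len(mensaje_cifrado), A discards a legitimate empty-string decryption because its truthiness test 'if resultado:' treats the matching result '' as a failure and returns None; B returns '' there, which is the intended value since the decryption really equals the target. — e.g. on backtrackSO("a", [("a", [""])], [], 0, ""): A returns none, B returns some ""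
import Mathlib
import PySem

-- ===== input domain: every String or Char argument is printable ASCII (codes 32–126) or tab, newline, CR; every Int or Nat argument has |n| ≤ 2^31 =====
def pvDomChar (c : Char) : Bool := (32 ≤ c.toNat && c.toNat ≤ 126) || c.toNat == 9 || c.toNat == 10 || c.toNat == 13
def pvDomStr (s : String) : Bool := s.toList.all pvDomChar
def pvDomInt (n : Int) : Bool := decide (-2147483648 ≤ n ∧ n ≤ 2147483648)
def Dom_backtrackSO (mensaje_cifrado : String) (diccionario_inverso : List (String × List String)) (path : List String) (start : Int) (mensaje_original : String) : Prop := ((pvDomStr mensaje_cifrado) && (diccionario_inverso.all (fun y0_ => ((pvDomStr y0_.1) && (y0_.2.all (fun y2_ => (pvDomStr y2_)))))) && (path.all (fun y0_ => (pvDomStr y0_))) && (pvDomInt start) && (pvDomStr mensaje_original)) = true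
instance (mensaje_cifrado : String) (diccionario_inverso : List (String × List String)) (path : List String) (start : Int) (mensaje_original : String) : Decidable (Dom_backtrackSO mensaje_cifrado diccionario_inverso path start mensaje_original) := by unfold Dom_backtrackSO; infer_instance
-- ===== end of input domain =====

-- B replaces A's generate-then-compare backtracking by a pruned prefix-matching search (options are
-- only tried where they match the corresponding prefix of mensaje_original); return value only: A
-- mutates `path` in place (append/pop, and leaves it extended on success), B never mutates it.

-- ===== PORT A =====
-- Literal transliteration of A's recursion; the Nat fuel is exactly the number of remaining
-- recursion steps (len - start) and only makes the recursion total: on inputs satisfying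
-- Pre_backtrackSO the fuel-0 branch is never reached (there Python raises IndexError).
def backtrackSOAux (mc : String) (dic : List (String × List String)) (mo : String) :
    Nat → List String → Int → Option String
  | 0, path, start =>
    if start = PySem.Str.len mc then
      let pd := PySem.Str.join "" path
      if pd = mo then some pd else none
    else none  -- unreachable under Pre_backtrackSO (start > len: Python raises IndexError)
  | fuel' + 1, path, start =>
    if start = PySem.Str.len mc then
      let pd := PySem.Str.join "" path
      if pd = mo then some pd else none
    else
      match PySem.Str.pyGet? mc start with
      | none => none  -- IndexError (start < -len), outside Pre_backtrackSO
      | some homofono =>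
        match PySem.Dict.get? (PySem.Dict.mk dic) (String.singleton homofono) with
        | some opciones =>
          opciones.findSome? (fun opcion =>
            match backtrackSOAux mc dic mo fuel' (path ++ [opcion]) (start + 1) with
            | some r => if r = "" then none else some r  -- 'if resultado:' — '' is falsy
            | none => none)
        | none =>
          match backtrackSOAux mc dic mo fuel' (path ++ [String.singleton homofono]) (start + 1) with
          | some r => if r = "" then none else some r
          | none => none

def backtrackSO (mensaje_cifrado : String) (diccionario_inverso : List (String × List String)) (path : List String) (start : Int) (mensaje_original : String) : Option String :=
  backtrackSOAux mensaje_cifrado diccionario_inverso mensaje_original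
    ((PySem.Str.len mensaje_cifrado - start).toNat) path start

-- ===== PORT B =====
-- solve(i, rest) of Source B: structural recursion on the remaining ciphertext characters
def pvSolve (dic : PySem.Dict String (List String)) : List Char → List Char → Bool
  | [], rest => rest.isEmpty
  | c :: cs, rest =>
    match PySem.Dict.get? dic (String.singleton c) with
    | some ops => ops.any (fun op =>
        PySem.Chars.startswith rest op.toList && pvSolve dic cs (rest.drop op.toList.length))
    | none => PySem.Chars.startswith rest [c] && pvSolve dic cs (rest.drop 1)

-- seq = [mensaje_cifrado[i] for i in range(start, len(mensaje_cifrado))]  (pyGetD: in-range under Pre_)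
def pvSeq (mc : String) (start : Int) : List Char :=
  (PySem.List.pyRange start (PySem.Str.len mc)).map (fun i => PySem.List.pyGetD mc.toList i ' ')

def backtrackSO_alt (mensaje_cifrado : String) (diccionario_inverso : List (String × List String)) (path : List String) (start : Int) (mensaje_original : String) : Option String :=
  let pref := PySem.Str.join "" path
  if PySem.Str.startswith mensaje_original pref then
    if pvSolve (PySem.Dict.mk diccionario_inverso) (pvSeq mensaje_cifrado start)
        (mensaje_original.toList.drop pref.toList.length)  -- mensaje_original[len(prefix):]
    then some mensaje_original else none
  else none

-- ===== PRECONDITION & SPEC =====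
-- Pre_ excludes exactly the inputs where Python A raises IndexError on mensaje_cifrado[start]
-- (start > len or start < -len); everywhere else A returns normally.
def Pre_backtrackSO (mensaje_cifrado : String) (diccionario_inverso : List (String × List String)) (path : List String) (start : Int) (mensaje_original : String) : Prop :=
  -(PySem.Str.len mensaje_cifrado) ≤ start ∧ start ≤ PySem.Str.len mensaje_cifrado
instance (mensaje_cifrado : String) (diccionario_inverso : List (String × List String)) (path : List String) (start : Int) (mensaje_original : String) : Decidable (Pre_backtrackSO mensaje_cifrado diccionario_inverso path start mensaje_original) := by unfold Pre_backtrackSO; infer_instance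

def pvWitness_backtrackSO : String × (List (String × List String)) × List String × Int × String :=
  ("ab", [("a", ["x"])], [], 0, "xb")

-- When mensaje_original = "" and start ≠ len(mensaje_cifrado) and an all-empty decryption exists
-- (all path entries empty, every remaining cipher character's dictionary entry contains ""),
-- A returns None because its truthiness test 'if resultado:' discards the matching result '';
-- B returns Some "", the intended value since the decryption really equals the target.
def D_backtrackSO (mensaje_cifrado : String) (diccionario_inverso : List (String × List String)) (path : List String) (start : Int) (mensaje_original : String) : Prop :=
  mensaje_original = "" ∧ start ≠ PySem.Str.len mensaje_cifrado ∧
  path.all (· = "") = true ∧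
  (mensaje_cifrado.toList.drop start.toNat).all
    (fun c => ((List.lookup (String.singleton c) diccionario_inverso).getD []).contains "") = true
instance (mensaje_cifrado : String) (diccionario_inverso : List (String × List String)) (path : List String) (start : Int) (mensaje_original : String) : Decidable (D_backtrackSO mensaje_cifrado diccionario_inverso path start mensaje_original) := by unfold D_backtrackSO; infer_instance

def Spec_backtrackSO (mensaje_cifrado : String) (diccionario_inverso : List (String × List String)) (path : List String) (start : Int) (mensaje_original : String) (out : Option String) : Prop := ¬ D_backtrackSO mensaje_cifrado diccionario_inverso path start mensaje_original → out = backtrackSO_alt mensaje_cifrado diccionario_inverso path start mensaje_original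
instance (mensaje_cifrado : String) (diccionario_inverso : List (String × List String)) (path : List String) (start : Int) (mensaje_original : String) (out : Option String) : Decidable (Spec_backtrackSO mensaje_cifrado diccionario_inverso path start mensaje_original out) := by unfold Spec_backtrackSO; infer_instance

def pvDiffWitness_backtrackSO : String × (List (String × List String)) × List String × Int × String :=
  ("a", [("a", [""])], [], 0, "")
def pvDiffWitnessOut_backtrackSO : (Option String) × (Option String) := (none, some "")

-- ===== CLAIM (what is proved, stated in full; the proofs are below) =====
def Claim_unchanged_backtrackSO : Prop := ∀ (mensaje_cifrado : String) (diccionario_inverso : List (String × List String)) (path : List String) (start : Int) (mensaje_original : String), Dom_backtrackSO mensaje_cifrado diccionario_inverso path start mensaje_original → Pre_backtrackSO mensaje_cifrado diccionario_inverso path start mensaje_original → Spec_backtrackSO mensaje_cifrado diccionario_inverso path start mensaje_original (backtrackSO mensaje_cifrado diccionario_inverso path start mensaje_original)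
def Claim_changed_backtrackSO : Prop := Dom_backtrackSO (pvDiffWitness_backtrackSO.1) (pvDiffWitness_backtrackSO.2.1) (pvDiffWitness_backtrackSO.2.2.1) (pvDiffWitness_backtrackSO.2.2.2.1) (pvDiffWitness_backtrackSO.2.2.2.2) ∧ Pre_backtrackSO (pvDiffWitness_backtrackSO.1) (pvDiffWitness_backtrackSO.2.1) (pvDiffWitness_backtrackSO.2.2.1) (pvDiffWitness_backtrackSO.2.2.2.1) (pvDiffWitness_backtrackSO.2.2.2.2) ∧ D_backtrackSO (pvDiffWitness_backtrackSO.1) (pvDiffWitness_backtrackSO.2.1) (pvDiffWitness_backtrackSO.2.2.1) (pvDiffWitness_backtrackSO.2.2.2.1) (pvDiffWitness_backtrackSO.2.2.2.2) ∧ backtrackSO (pvDiffWitness_backtrackSO.1) (pvDiffWitness_backtrackSO.2.1) (pvDiffWitness_backtrackSO.2.2.1) (pvDiffWitness_backtrackSO.2.2.2.1) (pvDiffWitness_backtrackSO.2.2.2.2) = pvDiffWitnessOut_backtrackSO.1 ∧ backtrackSO_alt (pvDiffWitness_backtrackSO.1) (pvDiffWitness_backtrackSO.2.1) (pvDiffWitness_backtrackSO.2.2.1)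 (pvDiffWitness_backtrackSO.2.2.2.1) (pvDiffWitness_backtrackSO.2.2.2.2) = pvDiffWitnessOut_backtrackSO.2 ∧ pvDiffWitnessOut_backtrackSO.1 ≠ pvDiffWitnessOut_backtrackSO.2
def Claim_exact_backtrackSO : Prop := ∀ (mensaje_cifrado : String) (diccionario_inverso : List (String × List String)) (path : List String) (start : Int) (mensaje_original : String), Dom_backtrackSO mensaje_cifrado diccionario_inverso path start mensaje_original → Pre_backtrackSO mensaje_cifrado diccionario_inverso path start mensaje_original → D_backtrackSO mensaje_cifrado diccionario_inverso path start mensaje_original → backtrackSO mensaje_cifrado diccionario_inverso path start mensaje_original ≠ backtrackSO_alt mensaje_cifrado diccionario_inverso path start mensaje_original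

-- ===== LEMMAS AND PROOFS =====

theorem pvPrefixAppend {α : Type} (a b l : List α) :
    (a ++ b) <+: l ↔ a <+: l ∧ b <+: l.drop a.length := by
  constructor
  · rintro ⟨t, rfl⟩
    refine ⟨⟨b ++ t, by simp⟩, ?_⟩
    rw [List.append_assoc, List.drop_left]
    exact ⟨t, rfl⟩
  · rintro ⟨⟨t, rfl⟩, hb⟩
    rw [List.drop_left] at hb
    obtain ⟨u, rfl⟩ := hb
    exact ⟨u, by simp⟩

theorem pvCharsJoinNilCons (x : List Char) (xs : List (List Char)) :
    PySem.Chars.join [] (x :: xs) = x ++ PySem.Chars.join [] xs := by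
  cases xs with
  | nil => simp [PySem.Chars.join_singleton, PySem.Chars.join_nil]
  | cons q qs => rw [PySem.Chars.join_cons_cons]; simp

theorem pvJoinCons (p : String) (ps : List String) :
    (PySem.Str.join "" (p :: ps)).toList = p.toList ++ (PySem.Str.join "" ps).toList := by
  rw [PySem.Str.toList_join, List.map_cons, PySem.Str.toList_join]
  exact pvCharsJoinNilCons _ _

theorem pvJoinAppend (path : List String) (o : String) :
    (PySem.Str.join "" (path ++ [o])).toList
      = (PySem.Str.join "" path).toList ++ o.toList := by
  induction path with
  | nil =>
    simp [PySem.Str.toList_join, PySem.Chars.join_singleton, PySem.Chars.join_nil]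
  | cons p ps ih =>
    rw [List.cons_append, pvJoinCons, pvJoinCons, ih, List.append_assoc]

theorem pvJoinNilIff (path : List String) :
    (PySem.Str.join "" path).toList = [] ↔ path.all (· = "") = true := by
  induction path with
  | nil => simp [PySem.Str.toList_join, PySem.Chars.join_nil]
  | cons p ps ih =>
    rw [pvJoinCons]
    simp only [List.all_cons, Bool.and_eq_true, List.append_eq_nil_iff, ih]
    constructor
    · rintro ⟨h1, h2⟩
      refine ⟨?_, h2⟩
      simp only [decide_eq_true_eq]
      rw [← String.toList_inj]; exact h1
    · rintro ⟨h1, h2⟩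
      refine ⟨?_, h2⟩
      simp only [decide_eq_true_eq] at h1
      simp [h1]

theorem pvGetDEq {α : Type} (xs : List α) (i : Int) (d : α) (c : α)
    (h : PySem.List.pyGet? xs i = some c) : PySem.List.pyGetD xs i d = c := by
  unfold PySem.List.pyGetD PySem.List.pyGet? at *
  rw [h]
  rfl

theorem pvSeqCons (mc : String) (start : Int) (c : Char)
    (h : PySem.Str.pyGet? mc start = some c) (hlt : start < PySem.Str.len mc) :
    pvSeq mc start = c :: pvSeq mc (start + 1) := by
  unfold pvSeq
  rw [PySem.List.pyRange_one_cons hlt, List.map_cons]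
  rw [PySem.Str.pyGet?_eq] at h
  rw [pvGetDEq _ _ _ _ h]

theorem pvFindSomeConst {α : Type} (mo : String) (ops : List α) (P : α → Prop)
    [DecidablePred P] :
    ops.findSome? (fun o => if P o then some mo else none)
      = if ∃ o ∈ ops, P o then some mo else none := by
  induction ops with
  | nil => simp
  | cons o os ih =>
    by_cases h : P o
    · simp [List.findSome?, h]
    · simp [List.findSome?, h, ih]

theorem pvPrefixFull {α : Type} (l m : List α) :
    (l <+: m ∧ (m.drop l.length).isEmpty = true) ↔ l = m := by
  constructor
  · rintro ⟨⟨t, rfl⟩, h⟩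
    rw [List.drop_left] at h
    simp only [List.isEmpty_iff] at h
    simp [h]
  · rintro rfl
    simp

theorem pvCharSome (mc : String) (start : Int)
    (hl : -(PySem.Str.len mc) ≤ start) (hlt : start < PySem.Str.len mc) :
    ∃ c, PySem.Str.pyGet? mc start = some c := by
  cases h : PySem.Str.pyGet? mc start with
  | some c => exact ⟨c, rfl⟩
  | none =>
    exfalso
    rw [PySem.Str.pyGet?_eq,
        show PySem.Chars.pyGet? = @PySem.List.pyGet? Char from rfl,
        PySem.List.pyGet?_eq_none_iff] at h
    have hlen := PySem.Str.len_eq mc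
    unfold PySem.Raise.InRange at h
    omega

-- characterization of A's recursion against B's pvSolve
theorem pvAeq (mc : String) (dic : List (String × List String)) (mo : String) :
    ∀ (fuel : Nat) (start : Int) (path : List String),
      (PySem.Str.len mc - start).toNat = fuel →
      -(PySem.Str.len mc) ≤ start → start ≤ PySem.Str.len mc →
      backtrackSOAux mc dic mo fuel path start =
        if ((PySem.Str.join "" path).toList <+: mo.toList
            ∧ pvSolve (PySem.Dict.mk dic) (pvSeq mc start)
                (mo.toList.drop (PySem.Str.join "" path).toList.length) = true
            ∧ (mo ≠ "" ∨ start = PySem.Str.len mc))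
        then some mo else none := by
  intro fuel
  induction fuel with
  | zero =>
    intro start path h0 hl hr
    have hs : start = PySem.Str.len mc := by omega
    have hseq : pvSeq mc start = [] := by
      unfold pvSeq
      rw [PySem.List.pyRange_one_eq_nil (by omega)]
      rfl
    simp only [backtrackSOAux, if_pos hs, hseq, pvSolve]
    show (if PySem.Str.join "" path = mo then some (PySem.Str.join "" path) else none) = _
    by_cases hj : PySem.Str.join "" path = mo
    · have hcond : ((PySem.Str.join "" path).toList <+: mo.toList
          ∧ (mo.toList.drop (PySem.Str.join "" path).toList.length).isEmpty = true
          ∧ (mo ≠ "" ∨ start = PySem.Str.len mc)) := by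
        refine ⟨by rw [hj], by rw [hj]; simp, Or.inr hs⟩
      rw [if_pos hj, if_pos hcond, hj]
    · rw [if_neg hj, if_neg ?_]
      rintro ⟨hp, he, _⟩
      exact hj (String.toList_inj.mp ((pvPrefixFull _ _).mp ⟨hp, he⟩))
  | succ fuel ih =>
    intro start path h0 hl hr
    have hlt : start < PySem.Str.len mc := by omega
    have hne : start ≠ PySem.Str.len mc := by omega
    obtain ⟨c, hg⟩ := pvCharSome mc start hl hlt
    have hseq := pvSeqCons mc start c hg hlt
    cases hd : PySem.Dict.get? (PySem.Dict.mk dic) (String.singleton c) with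
    | some ops =>
      simp only [backtrackSOAux, if_neg hne, hg, hd, hseq, pvSolve]
      have hf : (fun (opcion : String) =>
            match backtrackSOAux mc dic mo fuel (path ++ [opcion]) (start + 1) with
            | some r => if r = "" then none else some r
            | none => none)
          = (fun opcion => if ((PySem.Str.join "" path).toList ++ opcion.toList <+: mo.toList
                ∧ pvSolve (PySem.Dict.mk dic) (pvSeq mc (start + 1))
                    (mo.toList.drop ((PySem.Str.join "" path).toList.length + opcion.toList.length)) = true
                ∧ mo ≠ "") then some mo else (none : Option String)) := by
        funext o
        rw [ih (start + 1) (path ++ [o]) (by omega) (by omega) (by omega),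
            pvJoinAppend, List.length_append]
        by_cases hmo : mo = ""
        · subst hmo
          split_ifs <;> simp_all
        · split_ifs <;> simp_all
      rw [hf, pvFindSomeConst]
      refine if_congr ?_ rfl rfl
      rw [List.any_eq_true]
      simp only [Bool.and_eq_true, PySem.Chars.startswith_iff, List.drop_drop]
      constructor
      · rintro ⟨o, ho, hpre, hsolve, hmo⟩
        obtain ⟨h1, h2⟩ := (pvPrefixAppend _ _ _).mp hpre
        exact ⟨h1, ⟨o, ho, h2, hsolve⟩, Or.inl hmo⟩
      · rintro ⟨hpre, ⟨o, ho, hop, hsolve⟩, hor⟩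
        have hmo : mo ≠ "" := by
          rcases hor with h | h
          · exact h
          · exact absurd h hne
        exact ⟨o, ho, (pvPrefixAppend _ _ _).mpr ⟨hpre, hop⟩, hsolve, hmo⟩
    | none =>
      simp only [backtrackSOAux, if_neg hne, hg, hd, hseq, pvSolve]
      have hstep := ih (start + 1) (path ++ [String.singleton c]) (by omega) (by omega) (by omega)
      rw [hstep, pvJoinAppend, List.length_append, String.toList_singleton]
      have hlen1 : ([c] : List Char).length = 1 := rfl
      rw [hlen1]
      by_cases hmo : mo = ""
      · subst hmo
        split_ifs <;> simp_all
      · split_ifs with h1 h2 h3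
        · simp [hmo]
        · exfalso
          obtain ⟨hpre, hsolve, _⟩ := h1
          obtain ⟨ha, hb⟩ := (pvPrefixAppend _ _ _).mp hpre
          apply h2
          refine ⟨ha, ?_, Or.inl hmo⟩
          simp only [Bool.and_eq_true, PySem.Chars.startswith_iff, List.drop_drop]
          exact ⟨hb, hsolve⟩
        · exfalso
          obtain ⟨ha, hb, _⟩ := h3
          simp only [Bool.and_eq_true, PySem.Chars.startswith_iff, List.drop_drop] at hb
          apply h1
          exact ⟨(pvPrefixAppend _ _ _).mpr ⟨ha, hb.1⟩, hb.2, Or.inl hmo⟩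
        · rfl

theorem pvBeq (mc : String) (dic : List (String × List String)) (path : List String)
    (start : Int) (mo : String) :
    backtrackSO_alt mc dic path start mo =
      if ((PySem.Str.join "" path).toList <+: mo.toList
          ∧ pvSolve (PySem.Dict.mk dic) (pvSeq mc start)
              (mo.toList.drop (PySem.Str.join "" path).toList.length) = true)
      then some mo else none := by
  show (if PySem.Str.startswith mo (PySem.Str.join "" path) = true then
      if pvSolve (PySem.Dict.mk dic) (pvSeq mc start)
          (mo.toList.drop (PySem.Str.join "" path).toList.length) = true
      then some mo else none
    else none) = _
  rw [PySem.Str.startswith_eq]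
  split_ifs with h1 h2 h3 h4 h5 <;>
    simp_all [PySem.Chars.startswith_iff]

theorem pvAnyAndConst {α : Type} (l : List α) (f : α → Bool) (b : Bool) :
    l.any (fun o => f o && b) = (l.any f && b) := by
  cases b <;> simp

theorem pvLookupEq (d : List (String × List String)) (k : String) :
    PySem.Dict.get? (PySem.Dict.mk d) k = List.lookup k d := by
  induction d with
  | nil => rfl
  | cons p r ih =>
    cases p with | mk a b =>
    rw [PySem.Dict.get?_mk_cons]
    simp only [List.lookup]
    by_cases h : a = k
    · subst h
      simp
    · have h1 : (a == k) = false := by simp [h]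
      have h2 : (k == a) = false := by simp [Ne.symm h]
      simp [h1, h2, ih]

def pvRest (mc : String) (start : Int) : List Char :=
  if start < 0 then mc.toList.drop (mc.toList.length - (-start).toNat) ++ mc.toList
  else mc.toList.drop start.toNat

theorem pvMapNeg {α : Type} (L : List α) (d : α) :
    ∀ k : Nat, k ≤ L.length →
      (PySem.List.pyRange (-(k : Int)) 0).map (fun i => PySem.List.pyGetD L i d)
        = L.drop (L.length - k) := by
  intro k
  induction k with
  | zero =>
    intro _
    rw [show -((0 : Nat) : Int) = 0 from rfl, PySem.List.pyRange_one_eq_nil le_rfl]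
    simp
  | succ k ih =>
    intro hk
    rw [PySem.List.pyRange_one_cons (by push_cast; omega), List.map_cons,
        PySem.List.pyGetD_neg_natCast L (k + 1) d (by omega) hk,
        show (-((k + 1 : Nat) : Int) + 1) = -(k : Int) by push_cast; ring,
        ih (by omega),
        show L.length - k = (L.length - (k + 1)) + 1 by omega,
        ← List.drop_eq_getElem_cons (by omega)]

theorem pvRestEq (mc : String) (start : Int)
    (hl : -(PySem.Str.len mc) ≤ start) (hr : start ≤ PySem.Str.len mc) :
    pvSeq mc start = pvRest mc start := by
  have hlen : PySem.Str.len mc = PySem.List.len mc.toList := by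
    rw [PySem.Str.len_eq]; rfl
  by_cases h0 : 0 ≤ start
  · unfold pvSeq pvRest
    rw [if_neg (by omega), hlen, PySem.List.map_pyGetD_pyRange mc.toList ' ' h0]
  · unfold pvSeq pvRest
    rw [if_pos (by omega)]
    have hk : start = -(((-start).toNat : Nat) : Int) := by omega
    have hkle : (-start).toNat ≤ mc.toList.length := by
      rw [PySem.Str.len_eq] at hl; omega
    rw [PySem.List.pyRange_one_append start 0 (PySem.Str.len mc) (by omega)
          (by rw [PySem.Str.len_eq]; positivity),
        List.map_append, hlen, PySem.List.map_pyGetD_pyRange_zero]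
    rw [hk, pvMapNeg mc.toList ' ' (-start).toNat hkle]
    congr 3
    omega

theorem pvSolveNilAll (dic : List (String × List String)) :
    ∀ cs : List Char,
      pvSolve (PySem.Dict.mk dic) cs []
        = cs.all (fun c => ((List.lookup (String.singleton c) dic).getD []).contains "") := by
  intro cs
  induction cs with
  | nil => rfl
  | cons c cs ih =>
    simp only [pvSolve, List.all_cons, pvLookupEq]
    cases hl : List.lookup (String.singleton c) dic with
    | some ops =>
      simp only [List.drop_nil, ih, Option.getD_some]
      rw [pvAnyAndConst]
      congr 1
      rw [Bool.eq_iff_iff]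
      simp only [List.any_eq_true, PySem.Chars.startswith_iff, List.prefix_nil,
        List.contains_iff_mem]
      constructor
      · rintro ⟨op, hmem, hnil⟩
        have : op = "" := by rw [← String.toList_inj]; exact hnil
        rwa [this] at hmem
      · intro hmem
        exact ⟨"", hmem, rfl⟩
    | none =>
      have hsw : PySem.Chars.startswith [] [c] = false := by
        rw [Bool.eq_false_iff]
        intro h
        have := (PySem.Chars.startswith_iff _ _).mp h
        simp at this
      simp [hsw]

theorem pvSeqAll (mc : String) (start : Int) (f : Char → Bool)
    (hl : -(PySem.Str.len mc) ≤ start) (hr : start ≤ PySem.Str.len mc) :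
    (pvSeq mc start).all f = (mc.toList.drop start.toNat).all f := by
  rw [pvRestEq mc start hl hr]
  unfold pvRest
  split
  · have h0 : start.toNat = 0 := by omega
    rw [h0, List.drop_zero, List.all_append]
    cases h : mc.toList.all f
    · simp
    · simp only [Bool.and_true]
      rw [List.all_eq_true]
      intro x hx
      exact List.all_eq_true.mp h x (List.mem_of_mem_drop hx)
  · rfl

-- ===== VERDICT (by name: the statement is the Claim_ definition above) =====
theorem backtrackSO_spec : Claim_unchanged_backtrackSO := by
  unfold Claim_unchanged_backtrackSO
  intro mc dic path start mo _ hpre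
  unfold Spec_backtrackSO
  intro hnd
  obtain ⟨hl, hr⟩ := hpre
  unfold backtrackSO
  rw [pvAeq mc dic mo _ start path rfl hl hr, pvBeq]
  by_cases hs : start = PySem.Str.len mc
  · refine if_congr ?_ rfl rfl
    simp [hs]
  · by_cases hmo : mo = ""
    · subst hmo
      rw [if_neg (by rintro ⟨_, _, h | h⟩ <;> first | exact h rfl | exact hs h)]
      by_cases hB : ((PySem.Str.join "" path).toList <+: "".toList
          ∧ pvSolve (PySem.Dict.mk dic) (pvSeq mc start)
              ("".toList.drop (PySem.Str.join "" path).toList.length) = true)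
      · exfalso
        apply hnd
        unfold D_backtrackSO
        have hJ : (PySem.Str.join "" path).toList = [] := by
          have := hB.1
          simpa using this
        refine ⟨rfl, hs, (pvJoinNilIff path).mp hJ, ?_⟩
        have h2 := hB.2
        rw [show ("".toList.drop (PySem.Str.join "" path).toList.length) = [] from by simp,
            pvSolveNilAll, pvSeqAll mc start _ hl hr] at h2
        exact h2
      · rw [if_neg hB]
    · refine if_congr ?_ rfl rfl
      constructor
      · rintro ⟨a, b, _⟩
        exact ⟨a, b⟩
      · rintro ⟨a, b⟩
        exact ⟨a, b, Or.inl hmo⟩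

theorem backtrackSO_changed : Claim_changed_backtrackSO := by
  unfold Claim_changed_backtrackSO
  decide

theorem backtrackSO_tight : Claim_exact_backtrackSO := by
  unfold Claim_exact_backtrackSO
  intro mc dic path start mo _ hpre hD
  obtain ⟨hl, hr⟩ := hpre
  obtain ⟨hmo0, hs, hpath, hok⟩ := hD
  subst hmo0
  unfold backtrackSO
  rw [pvAeq mc dic "" _ start path rfl hl hr, pvBeq]
  have hJ : (PySem.Str.join "" path).toList = [] := (pvJoinNilIff path).mpr hpath
  rw [if_neg (by rintro ⟨_, _, h | h⟩ <;> first | exact h rfl | exact hs h)]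
  rw [if_pos ?_]
  · simp
  · refine ⟨by rw [hJ]; exact List.nil_prefix, ?_⟩
    rw [hJ]
    rw [show ("".toList.drop ([] : List Char).length) = [] from by simp,
        pvSolveNilAll, pvSeqAll mc start _ hl hr]
    exact hok
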